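-- pv_equiv track=rewrite | github.com/rtx9785work-commits/VPN | bot.py | _group_by_country
-- ===== SOURCE A (Python) =====
-- from collections import Counter, defaultdict
--
-- def _group_by_country(items: list[dict], quota: int) -> list[dict]:
--     by_c:  dict = defaultdict(list)
--     for item in items:
--         by_c[item['country']].append(item)
--
--     order = sorted(by_c.keys(), key=lambda c: -len(by_c[c]))
--     if not order:
--         return []
--
--     MAX_PER = 5
--     alloc   = {c: 1 for c in order}
--     rem     = quota - len(order)
--     while rem > 0:
--         gave = 0
--         for c in order:
--             if rem <= 0:
--                 break
--             if alloc[c] < min(len(by_c[c]), MAX_PER):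
--                 alloc[c] += 1
--                 rem -= 1
--                 gave += 1
--         if gave == 0:
--             break
--
--     sel = []
--     for c in order:
--         sel.extend(by_c[c][:alloc[c]])
--     return sel[:quota]
-- ===== SOURCE B (Python) =====
-- def _group_by_country(items: list, quota: int) -> list:
--     by_c: dict = {}
--     for item in items:
--         c = item['country']
--         by_c[c] = by_c.get(c, []) + [item]
--
--     order = sorted(by_c.keys(), key=lambda c: -len(by_c[c]))
--     if not order:
--         return []
--
--     MAX_PER = 5
--     caps = {c: min(len(by_c[c]), MAX_PER) for c in order}
--     alloc = {c: 1 for c in order}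
--     rem = quota - len(order)
--     level = 1
--     # water-fill: raise the common level one unit at a time, bulk-assigning a
--     # whole round to every still-unsaturated country; hand the partial last
--     # round to the first eligible countries in sorted order.
--     while rem > 0:
--         elig = [c for c in order if level < caps[c]]
--         if not elig:
--             break
--         if len(elig) <= rem:
--             level += 1
--             for c in elig:
--                 alloc[c] = level
--             rem -= len(elig)
--         else:
--             for c in elig[:rem]:
--                 alloc[c] = level + 1
--             break
--
--     sel = [it for c in order for it in by_c[c][:alloc[c]]]
--     return sel[:quota]
-- ===== Notes on version B (the rewrite author's own statement) =====
-- stated objective: alternative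
-- what changed: A hands out the quota one unit at a time in repeated round-robin passes with per-unit dict bookkeeping and a gave counter; B computes the same allocation as a level-wise water-fill that assigns a whole round in bulk per step (caps via min(len,5), leftover units to the first eligible countries in sorted order), and builds the selection as a comprehension.
import Mathlib
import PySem

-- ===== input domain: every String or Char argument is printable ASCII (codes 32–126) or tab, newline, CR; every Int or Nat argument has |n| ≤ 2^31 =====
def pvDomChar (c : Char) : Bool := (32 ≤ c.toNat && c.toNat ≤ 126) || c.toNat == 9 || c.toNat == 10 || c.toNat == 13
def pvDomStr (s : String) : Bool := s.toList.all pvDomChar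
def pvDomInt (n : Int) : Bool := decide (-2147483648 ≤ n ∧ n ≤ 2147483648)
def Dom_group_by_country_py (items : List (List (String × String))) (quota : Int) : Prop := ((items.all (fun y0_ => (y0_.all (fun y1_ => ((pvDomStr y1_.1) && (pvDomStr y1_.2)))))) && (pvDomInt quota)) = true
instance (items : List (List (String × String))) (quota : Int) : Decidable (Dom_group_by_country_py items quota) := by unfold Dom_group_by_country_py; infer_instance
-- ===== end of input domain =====

-- B replaces A's one-unit-at-a-time round-robin loop with a level-wise water-fill that assigns a
-- whole round of quota in bulk per step (objective: alternative). Return values only; neither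
-- implementation mutates its arguments observably.

-- ===== PORT A =====

-- item['country'] : first-match lookup in the item dict; the KeyError (none) case is outside Pre_.
def pvCountry (item : List (String × String)) : String :=
  ((PySem.Dict.mk item).get? "country").getD ""

-- the inner `for c in order:` pass of A (with its `break` on rem <= 0);
-- `alloc[c]` is exact as getD 0 because every c in order is a key of alloc.
def pvInnerA (by_c : PySem.Dict String (List (List (String × String)))) :
    List String → PySem.Dict String Int → Int → Int →
    PySem.Dict String Int × Int × Int
  | [], alloc, rem, gave => (alloc, rem, gave)
  | c :: cs, alloc, rem, gave =>
    if rem ≤ 0 then (alloc, rem, gave)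
    else if alloc.getD c 0 < min ((by_c.getD c []).length : Int) 5 then
      pvInnerA by_c cs (alloc.insert c (alloc.getD c 0 + 1)) (rem - 1) (gave + 1)
    else
      pvInnerA by_c cs alloc rem gave

-- the `while rem > 0:` loop of A; fuel = rem.toNat at the call site is never exhausted, because
-- every iteration that continues had gave > 0 and therefore decreased rem by at least 1.
def pvWhileA (by_c : PySem.Dict String (List (List (String × String))))
    (order : List String) :
    Nat → PySem.Dict String Int → Int → PySem.Dict String Int
  | 0, alloc, _ => alloc
  | fuel + 1, alloc, rem =>
    if rem ≤ 0 then alloc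
    else if (pvInnerA by_c order alloc rem 0).2.2 = 0 then (pvInnerA by_c order alloc rem 0).1
    else pvWhileA by_c order fuel (pvInnerA by_c order alloc rem 0).1
      (pvInnerA by_c order alloc rem 0).2.1

def group_by_country_py (items : List (List (String × String))) (quota : Int) :
    List (List (String × String)) :=
  let by_c := items.foldl
    (fun d it => d.modify (pvCountry it) [] (fun l => l ++ [it])) PySem.Dict.empty
  let order := PySem.List.sorted by_c.keys (fun c => -((by_c.getD c []).length : Int))
  if order.isEmpty then []
  else
    let alloc0 := order.foldl (fun a c => a.insert c (1 : Int)) PySem.Dict.empty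
    let rem := quota - (order.length : Int)
    let alloc := pvWhileA by_c order rem.toNat alloc0 rem
    let sel := order.foldl
      (fun s c => s ++ PySem.List.slice (by_c.getD c []) none (some (alloc.getD c 0))) []
    PySem.List.slice sel none (some quota)

-- ===== PORT B =====

-- `for c in cs: alloc[c] = v`
def pvBumpB (alloc : PySem.Dict String Int) (cs : List String) (v : Int) :
    PySem.Dict String Int :=
  cs.foldl (fun a c => a.insert c v) alloc

-- B's water-fill `while rem > 0:` loop; fuel 5 at the call site is never exhausted, because
-- caps[c] ≤ 5, level starts at 1 and grows by 1 per iteration, and once level ≥ 5 elig is empty.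
def pvLevelB (caps : PySem.Dict String Int) (order : List String) :
    Nat → PySem.Dict String Int → Int → Int → PySem.Dict String Int
  | 0, alloc, _, _ => alloc
  | fuel + 1, alloc, level, rem =>
    if rem ≤ 0 then alloc
    else if (order.filter (fun c => decide (level < caps.getD c 0))).isEmpty then alloc
    else if ((order.filter (fun c => decide (level < caps.getD c 0))).length : Int) ≤ rem then
      pvLevelB caps order fuel
        (pvBumpB alloc (order.filter (fun c => decide (level < caps.getD c 0))) (level + 1))
        (level + 1)
        (rem - ((order.filter (fun c => decide (level < caps.getD c 0))).length : Int))
    else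
      pvBumpB alloc
        (PySem.List.slice (order.filter (fun c => decide (level < caps.getD c 0))) none (some rem))
        (level + 1)

def group_by_country_py_alt (items : List (List (String × String))) (quota : Int) :
    List (List (String × String)) :=
  let by_c := items.foldl
    (fun d it => d.insert (pvCountry it) (d.getD (pvCountry it) [] ++ [it])) PySem.Dict.empty
  let order := PySem.List.sorted by_c.keys (fun c => -((by_c.getD c []).length : Int))
  if order.isEmpty then []
  else
    let caps := order.foldl
      (fun d c => d.insert c (min ((by_c.getD c []).length : Int) 5)) PySem.Dict.empty
    let alloc0 := order.foldl (fun a c => a.insert c (1 : Int)) PySem.Dict.empty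
    let alloc := pvLevelB caps order 5 alloc0 1 (quota - (order.length : Int))
    let sel := order.flatMap
      (fun c => PySem.List.slice (by_c.getD c []) none (some (alloc.getD c 0)))
    PySem.List.slice sel none (some quota)

-- ===== PRECONDITION & SPEC =====
-- Pre_ excludes exactly the inputs with an item lacking a 'country' key, on which A raises KeyError.
def Pre_group_by_country_py (items : List (List (String × String))) (_quota : Int) : Prop :=
  ∀ item ∈ items, ((PySem.Dict.mk item).get? "country").isSome

instance (items : List (List (String × String))) (quota : Int) :
    Decidable (Pre_group_by_country_py items quota) := by
  unfold Pre_group_by_country_py; infer_instance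

def pvWitness_group_by_country_py : (List (List (String × String))) × Int :=
  ([[("country", "de")], [("country", "fr"), ("ip", "10.0.0.1")], [("country", "de")]], 4)

def Spec_group_by_country_py (items : List (List (String × String))) (quota : Int)
    (out : List (List (String × String))) : Prop :=
  out = group_by_country_py_alt items quota

instance (items : List (List (String × String))) (quota : Int)
    (out : List (List (String × String))) :
    Decidable (Spec_group_by_country_py items quota out) := by
  unfold Spec_group_by_country_py; infer_instance

-- ===== CLAIM (what is proved, stated in full; the proofs are below) =====
def Claim_equal_group_by_country_py : Prop :=
  ∀ (items : List (List (String × String))) (quota : Int),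
    Dom_group_by_country_py items quota → Pre_group_by_country_py items quota →
      Spec_group_by_country_py items quota (group_by_country_py items quota)

-- ===== LEMMAS AND PROOFS =====

-- the per-country cap min(len(by_c[c]), MAX_PER)
def pvCap (by_c : PySem.Dict String (List (List (String × String)))) (c : String) : Int :=
  min ((by_c.getD c []).length : Int) 5

-- a fold of inserts whose inserted value depends only on the key
theorem pvGetD_foldl_insert_fun (f : String → Int) (l : List String)
    (d : PySem.Dict String Int) (c : String) :
    (l.foldl (fun a x => a.insert x (f x)) d).getD c 0 =
      if c ∈ l then f c else d.getD c 0 := by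
  induction l generalizing d with
  | nil => simp
  | cons x xs ih =>
    simp only [List.foldl_cons, ih, List.mem_cons]
    by_cases hx : c ∈ xs
    · simp [hx]
    · simp only [hx, or_false, if_false, PySem.Dict.getD_insert]
      by_cases hcx : c = x <;> simp [hcx]

theorem pvBumpB_getD (alloc : PySem.Dict String Int) (cs : List String) (v : Int)
    (c : String) :
    (pvBumpB alloc cs v).getD c 0 = if c ∈ cs then v else alloc.getD c 0 :=
  pvGetD_foldl_insert_fun (fun _ => v) cs alloc c

-- one pass of A's inner loop, started from a level-uniform allocation: it gives one unit to the
-- first (min rem #eligible) eligible countries in order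
theorem pvInnerA_spec (by_c : PySem.Dict String (List (List (String × String))))
    (level : Int) :
    ∀ (cs : List String) (alloc : PySem.Dict String Int) (rem gave : Int),
      cs.Nodup → 0 ≤ rem →
      (∀ c ∈ cs, alloc.getD c 0 = min (pvCap by_c c) level) →
      (pvInnerA by_c cs alloc rem gave).2.1 =
          rem - min rem (((cs.filter (fun c => decide (level < pvCap by_c c))).length : Int)) ∧
      (pvInnerA by_c cs alloc rem gave).2.2 =
          gave + min rem (((cs.filter (fun c => decide (level < pvCap by_c c))).length : Int)) ∧
      ∀ x, (pvInnerA by_c cs alloc rem gave).1.getD x 0 =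
        if x ∈ (cs.filter (fun c => decide (level < pvCap by_c c))).take
            (min rem (((cs.filter (fun c => decide (level < pvCap by_c c))).length : Int))).toNat
        then min (pvCap by_c x) (level + 1)
        else alloc.getD x 0 := by
  intro cs
  induction cs with
  | nil =>
    intro alloc rem gave _ hrem _
    have h0 : min rem ((0:Int)) = 0 := by omega
    simp [pvInnerA, h0]
  | cons c cs ih =>
    intro alloc rem gave hnd hrem hinv
    have hc := hinv c List.mem_cons_self
    have hcns : c ∉ cs := (List.nodup_cons.mp hnd).1
    by_cases h0 : rem ≤ 0
    · have hr0 : rem = 0 := le_antisymm h0 hrem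
      subst hr0
      simp [pvInnerA]
    · simp only [pvInnerA, if_neg h0]
      by_cases he : level < pvCap by_c c
      · -- c is eligible: it takes one unit
        have hcv : alloc.getD c 0 < min ((by_c.getD c []).length : Int) 5 := by
          simp only [pvCap] at hc he; omega
        rw [if_pos hcv]
        have hinv' : ∀ c' ∈ cs, (alloc.insert c (alloc.getD c 0 + 1)).getD c' 0
            = min (pvCap by_c c') level := by
          intro c' h'
          rw [PySem.Dict.getD_insert, if_neg (by rintro rfl; exact hcns h')]
          exact hinv c' (List.mem_cons_of_mem _ h')
        obtain ⟨ih1, ih2, ih3⟩ := ih (alloc.insert c (alloc.getD c 0 + 1)) (rem - 1) (gave + 1)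
          (List.nodup_cons.mp hnd).2 (by omega) hinv'
        have hfc : (c :: cs).filter (fun c => decide (level < pvCap by_c c))
            = c :: cs.filter (fun c => decide (level < pvCap by_c c)) := by
          simp [he]
        set elig := cs.filter (fun c => decide (level < pvCap by_c c)) with helig
        have htt : min rem (((c :: elig).length : Int))
            = min (rem - 1) ((elig.length : Int)) + 1 := by
          simp only [List.length_cons]; push_cast; omega
        have htn : (min (rem - 1) ((elig.length : Int)) + 1).toNat
            = (min (rem - 1) ((elig.length : Int))).toNat + 1 := by
          have : (0:Int) ≤ (elig.length : Int) := by positivity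
          omega
        rw [hfc]
        refine ⟨by rw [ih1]; omega, by rw [ih2]; omega, ?_⟩
        intro x
        rw [ih3 x, htt, htn, List.take_succ_cons]
        by_cases hx1 : x ∈ elig.take (min (rem - 1) ((elig.length : Int))).toNat
        · simp [hx1]
        · rw [if_neg hx1, PySem.Dict.getD_insert]
          by_cases hxc : x = c
          · subst hxc
            rw [if_pos rfl, if_pos List.mem_cons_self, hc]
            simp only [pvCap] at he ⊢; omega
          · rw [if_neg hxc, if_neg (by simp [hxc, hx1])]
      · -- c is saturated: the pass skips it
        have hcv : ¬ alloc.getD c 0 < min ((by_c.getD c []).length : Int) 5 := by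
          simp only [pvCap] at hc he; omega
        rw [if_neg hcv]
        have hfc : (c :: cs).filter (fun c => decide (level < pvCap by_c c))
            = cs.filter (fun c => decide (level < pvCap by_c c)) := by
          simp [he]
        rw [hfc]
        exact ih alloc rem gave (List.nodup_cons.mp hnd).2 hrem
          (fun c' h' => hinv c' (List.mem_cons_of_mem _ h'))

theorem pvWhileA_nonpos (by_c : PySem.Dict String (List (List (String × String))))
    (order : List String) (fuel : Nat) (alloc : PySem.Dict String Int) (rem : Int)
    (h : rem ≤ 0) : pvWhileA by_c order fuel alloc rem = alloc := by
  cases fuel <;> simp [pvWhileA, h]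

-- the two allocation loops agree on every country of `order`
theorem pvLoops_agree (by_c : PySem.Dict String (List (List (String × String))))
    (capd : PySem.Dict String Int) (order : List String)
    (hnd : order.Nodup)
    (hcap : ∀ c ∈ order, capd.getD c 0 = pvCap by_c c) :
    ∀ (fuelB : Nat) (level : Int) (allocA allocB : PySem.Dict String Int) (rem : Int)
      (fuelA : Nat),
      5 ≤ level + (fuelB : Int) →
      rem.toNat ≤ fuelA →
      (∀ c ∈ order, allocA.getD c 0 = min (pvCap by_c c) level) →
      (∀ c ∈ order, allocB.getD c 0 = min (pvCap by_c c) level) →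
      ∀ c ∈ order, (pvWhileA by_c order fuelA allocA rem).getD c 0 =
        (pvLevelB capd order fuelB allocB level rem).getD c 0 := by
  intro fuelB
  induction fuelB with
  | zero =>
    -- level ≥ 5: no country is eligible any more, both loops are done
    intro level allocA allocB rem fuelA h5 hfA hA hB c hc
    have hlev : (5:Int) ≤ level := by push_cast at h5; omega
    have helig : order.filter (fun c => decide (level < pvCap by_c c)) = [] := by
      apply List.filter_eq_nil_iff.mpr
      intro a _
      simp only [decide_eq_true_eq, not_lt, pvCap]
      omega
    simp only [pvLevelB]
    cases fuelA with
    | zero => simp only [pvWhileA]; rw [hA c hc, hB c hc]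
    | succ f =>
      simp only [pvWhileA]
      by_cases h0 : rem ≤ 0
      · rw [if_pos h0, hA c hc, hB c hc]
      · rw [if_neg h0]
        obtain ⟨h1, h2, h3⟩ := pvInnerA_spec by_c level order allocA rem 0 hnd (by omega) hA
        have hg : (pvInnerA by_c order allocA rem 0).2.2 = 0 := by
          rw [h2, helig]; simp; omega
        rw [if_pos hg, h3 c, helig]
        simp only [List.take_nil, List.not_mem_nil, if_false]
        rw [hA c hc, hB c hc]
  | succ fb ih =>
    intro level allocA allocB rem fuelA h5 hfA hA hB c hc
    by_cases h0 : rem ≤ 0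
    · rw [pvWhileA_nonpos _ _ _ _ _ h0]
      simp only [pvLevelB]
      rw [if_pos h0, hA c hc, hB c hc]
    · obtain ⟨f, rfl⟩ : ∃ f, fuelA = f + 1 := by
        cases fuelA with
        | zero => exfalso; omega
        | succ f => exact ⟨f, rfl⟩
      simp only [pvWhileA, pvLevelB, if_neg h0]
      obtain ⟨h1, h2, h3⟩ := pvInnerA_spec by_c level order allocA rem 0 hnd (by omega) hA
      have heq : order.filter (fun c => decide (level < capd.getD c 0))
          = order.filter (fun c => decide (level < pvCap by_c c)) :=
        List.filter_congr (fun a ha => by rw [hcap a ha])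
      rw [heq]
      set elig := order.filter (fun c => decide (level < pvCap by_c c)) with helig
      have hmem_elig : ∀ x, x ∈ elig ↔ x ∈ order ∧ level < pvCap by_c x := by
        intro x; rw [helig]; simp [List.mem_filter]
      by_cases hel : elig.isEmpty
      · -- everyone saturated: A's pass gives nothing (gave = 0), both loops stop
        have hel' : elig = [] := List.isEmpty_iff.mp hel
        rw [if_pos hel]
        have hg : (pvInnerA by_c order allocA rem 0).2.2 = 0 := by
          rw [h2, hel']; simp; omega
        rw [if_pos hg, h3 c, hel']
        simp only [List.take_nil, List.not_mem_nil, if_false]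
        rw [hA c hc, hB c hc]
      · rw [if_neg hel]
        have hlen1 : 1 ≤ ((elig.length : Int)) := by
          have h1' : elig ≠ [] := fun h => hel (by simp [h])
          have := List.length_pos_iff.mpr h1'
          omega
        by_cases hle : ((elig.length : Int)) ≤ rem
        · -- a full round: every eligible country takes one unit, the level rises by 1
          rw [if_pos hle]
          have ht : min rem ((elig.length : Int)) = elig.length := by omega
          have hg : ¬ (pvInnerA by_c order allocA rem 0).2.2 = 0 := by
            rw [h2, ht]; omega
          rw [if_neg hg, h1, ht]
          have hA' : ∀ c' ∈ order, (pvInnerA by_c order allocA rem 0).1.getD c' 0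
              = min (pvCap by_c c') (level + 1) := by
            intro c' hc'
            rw [h3 c', ht, Int.toNat_natCast, List.take_length]
            by_cases hx : c' ∈ elig
            · rw [if_pos hx]
            · rw [if_neg hx, hA c' hc']
              have : ¬ level < pvCap by_c c' := fun h => hx ((hmem_elig c').mpr ⟨hc', h⟩)
              omega
          have hB' : ∀ c' ∈ order, (pvBumpB allocB elig (level + 1)).getD c' 0
              = min (pvCap by_c c') (level + 1) := by
            intro c' hc'
            rw [pvBumpB_getD]
            by_cases hx : c' ∈ elig
            · rw [if_pos hx]
              have := ((hmem_elig c').mp hx).2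
              omega
            · rw [if_neg hx, hB c' hc']
              have : ¬ level < pvCap by_c c' := fun h => hx ((hmem_elig c').mpr ⟨hc', h⟩)
              omega
          exact ih (level + 1) _ _ (rem - (elig.length : Int)) f
            (by push_cast at h5 ⊢; omega) (by omega) hA' hB' c hc
        · -- a partial last round: the first rem eligible countries (in order) take one unit
          rw [if_neg hle]
          have ht : min rem ((elig.length : Int)) = rem := by omega
          have hg : ¬ (pvInnerA by_c order allocA rem 0).2.2 = 0 := by
            rw [h2, ht]; omega
          rw [if_neg hg, h1, ht, sub_self, pvWhileA_nonpos _ _ _ _ _ le_rfl]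
          rw [PySem.List.slice_to (b := rem) (hb := by omega), pvBumpB_getD, h3 c, ht]
          by_cases hx : c ∈ elig.take rem.toNat
          · rw [if_pos hx, if_pos hx]
            have := ((hmem_elig c).mp (List.mem_of_mem_take hx)).2
            omega
          · rw [if_neg hx, if_neg hx, hA c hc, hB c hc]

-- the grouping loop: buckets and keys
theorem pvGroup_getD (items : List (List (String × String))) (c : String) :
    (items.foldl (fun d it => d.modify (pvCountry it) [] (fun l => l ++ [it]))
        PySem.Dict.empty).getD c [] =
      items.filter (fun it => pvCountry it == c) := by
  have h := PySem.Dict.getD_foldl_modify_append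
    (l := items.map (fun it => (pvCountry it, it))) (d := PySem.Dict.empty) (c := c)
  rw [List.foldl_map] at h
  simp only [PySem.Dict.getD_empty] at h
  rw [show (fun (d : PySem.Dict String (List (List (String × String)))) (it : List (String × String)) => d.modify (pvCountry it) [] fun l => l ++ [it]) = fun d it => d.modify (pvCountry it, it).1 [] fun l => l ++ [(pvCountry it, it).2] from rfl]
  rw [h]
  simp [List.filter_map, List.map_map, Function.comp_def]

theorem pvGroup_keys (items : List (List (String × String))) :
    (items.foldl (fun d it => d.modify (pvCountry it) [] (fun l => l ++ [it]))
        PySem.Dict.empty).keys = PySem.Set.ofList (items.map pvCountry) := by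
  rw [PySem.Dict.keys_foldl_modify_key items pvCountry [] (fun _ it l => l ++ [it])]
  simp [PySem.Set.update_nil_left]

-- every country appearing in `order` has a nonempty bucket
theorem pvOrder_bucket_nonempty (items : List (List (String × String))) :
    ∀ c ∈ PySem.List.sorted
        ((items.foldl (fun d it => d.modify (pvCountry it) [] (fun l => l ++ [it]))
          PySem.Dict.empty).keys)
        (fun c => -(((items.foldl (fun d it => d.modify (pvCountry it) [] (fun l => l ++ [it]))
          PySem.Dict.empty).getD c []).length : Int)),
      1 ≤ ((items.foldl (fun d it => d.modify (pvCountry it) [] (fun l => l ++ [it]))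
          PySem.Dict.empty).getD c []).length := by
  intro c hc
  rw [PySem.List.mem_sorted, pvGroup_keys, PySem.Set.mem_ofList] at hc
  obtain ⟨it, hit, rfl⟩ := List.mem_map.mp hc
  rw [pvGroup_getD]
  have hmem : it ∈ items.filter (fun it' => pvCountry it' == pvCountry it) := by
    simp [List.mem_filter, hit]
  have := List.length_pos_iff.mpr (List.ne_nil_of_mem hmem)
  omega

theorem pvPorts_eq (items : List (List (String × String))) (quota : Int) :
    group_by_country_py items quota = group_by_country_py_alt items quota := by
  simp only [group_by_country_py, group_by_country_py_alt]
  rw [show (fun (d : PySem.Dict String (List (List (String × String)))) (it : List (String × String)) => d.insert (pvCountry it) (d.getD (pvCountry it) [] ++ [it])) = fun d it => d.modify (pvCountry it) [] (fun l => l ++ [it]) from rfl]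
  set byc := items.foldl (fun d it => d.modify (pvCountry it) [] (fun l => l ++ [it]))
    PySem.Dict.empty with hbyc
  set ordr := PySem.List.sorted byc.keys (fun c => -((byc.getD c []).length : Int)) with hordr
  by_cases h : ordr.isEmpty
  · rw [if_pos h, if_pos h]
  · rw [if_neg h, if_neg h]
    set rem := quota - (ordr.length : Int) with hrem
    set alloc0 := ordr.foldl (fun a c => a.insert c (1 : Int)) PySem.Dict.empty with halloc0
    set capsd := ordr.foldl (fun d c => d.insert c (min ((byc.getD c []).length : Int) 5))
      PySem.Dict.empty with hcapsd
    have hnd : ordr.Nodup := by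
      have hperm := PySem.List.sorted_perm byc.keys
        (fun c => -((byc.getD c []).length : Int)) false
      have hkeys : byc.keys.Nodup := by
        rw [hbyc, pvGroup_keys]; exact PySem.Set.nodup_ofList _
      exact (List.Perm.nodup_iff hperm).mpr hkeys
    have hb1 : ∀ c ∈ ordr, 1 ≤ ((byc.getD c []).length : Int) := by
      intro c hc
      have := pvOrder_bucket_nonempty items c (by rw [hordr, hbyc] at hc; exact hc)
      rw [hbyc]
      omega
    have hcap : ∀ c ∈ ordr, capsd.getD c 0 = pvCap byc c := by
      intro c hc
      rw [hcapsd, pvGetD_foldl_insert_fun (f := fun c => min ((byc.getD c []).length : Int) 5),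
        if_pos hc]
      rfl
    have hinv : ∀ c ∈ ordr, alloc0.getD c 0 = min (pvCap byc c) 1 := by
      intro c hc
      rw [halloc0, pvGetD_foldl_insert_fun (f := fun _ => (1 : Int)), if_pos hc]
      have := hb1 c hc
      simp only [pvCap]
      omega
    have hAB : ∀ c ∈ ordr,
        (pvWhileA byc ordr rem.toNat alloc0 rem).getD c 0 =
        (pvLevelB capsd ordr 5 alloc0 1 rem).getD c 0 :=
      pvLoops_agree byc capsd ordr hnd hcap 5 1 alloc0 alloc0 rem rem.toNat
        (by norm_num) le_rfl hinv hinv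
    have hsel : ordr.foldl
        (fun s c => s ++ PySem.List.slice (byc.getD c []) none
          (some ((pvWhileA byc ordr rem.toNat alloc0 rem).getD c 0))) [] =
        ordr.flatMap
          (fun c => PySem.List.slice (byc.getD c []) none
            (some ((pvLevelB capsd ordr 5 alloc0 1 rem).getD c 0))) := by
      rw [PySem.List.foldl_congr_mem _ _
        (fun s c => s ++ PySem.List.slice (byc.getD c []) none
          (some ((pvLevelB capsd ordr 5 alloc0 1 rem).getD c 0))) _
        (fun acc x hx => by rw [hAB x hx])]
      rw [PySem.List.foldl_append_eq_flatMap]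
      simp
    rw [hsel]

-- ===== VERDICT (by name: the statement is the Claim_ definition above) =====
theorem group_by_country_py_spec : Claim_equal_group_by_country_py := by
  unfold Claim_equal_group_by_country_py
  intro items quota _ _
  unfold Spec_group_by_country_py
  exact pvPorts_eq items quota
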